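-- pv_equiv track=rewrite | github.com/sofiamoniz/RI1st | clean/documentIndexer/ImprovedTokenizer.py | characs_same
-- ===== SOURCE A (Python) =====
-- def characs_same(s) :
--
--     """
--     Verifies if a string has all the same chars (Eg. "aaaaa" )
--     or 3 same sequential chars (Eg. "aaab")
--     or 2 same sequential and len equal to 3 (Eg. "aab")
--
--
--     After a research, we found that
--     "In English the most common repeated letters are ss, ee, tt, ff, ll, mm and oo" from https://www3.nd.edu/~busiforc/handouts/cryptography/cryptography%20hints.html
--
--     So, we also exclude all ther terms with repeated chars not from this list.
--     """
--
--     n = len(s)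
--     sameChars=0
--     repeatedChars=""
--
--     if(len(s)>=3):
--         for i in range(0, n-1) :
--             j=i+1
--             if s[i] == s[j] :
--                 sameChars=sameChars+1
--                 repeatedChars=s[i]+s[j]
--
--     if (sameChars>=2) or (sameChars==1 and len(s)==3) or (sameChars==1 and repeatedChars not in ["ss","tt","ff","ll","mm","oo","ee"]): return True
--     else: return False
-- ===== SOURCE B (Python) =====
-- def characs_same(s):
--     if len(s) < 3:
--         return False
--     # run-length encode s
--     runs = []
--     for ch in s:
--         if runs and runs[-1][0] == ch:
--             runs[-1][1] += 1
--         else: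
--             runs.append([ch, 1])
--     sameChars = len(s) - len(runs)
--     rep = ""
--     for c, k in runs:
--         if k >= 2:
--             rep = c + c
--     return sameChars >= 2 or (sameChars == 1 and len(s) == 3) or (sameChars == 1 and rep not in ["ss", "tt", "ff", "ll", "mm", "oo", "ee"])
-- ===== Notes on version B (the rewrite author's own statement) =====
-- stated objective: alternative
-- what changed: B run-length-encodes the string once and derives sameChars as len(s) - number_of_runs and the repeated pair as the last run of length >= 2 doubled, instead of A's index loop over s[i]==s[i+1] pairs; B also short-circuits strings shorter than 3.
import Mathlib
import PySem

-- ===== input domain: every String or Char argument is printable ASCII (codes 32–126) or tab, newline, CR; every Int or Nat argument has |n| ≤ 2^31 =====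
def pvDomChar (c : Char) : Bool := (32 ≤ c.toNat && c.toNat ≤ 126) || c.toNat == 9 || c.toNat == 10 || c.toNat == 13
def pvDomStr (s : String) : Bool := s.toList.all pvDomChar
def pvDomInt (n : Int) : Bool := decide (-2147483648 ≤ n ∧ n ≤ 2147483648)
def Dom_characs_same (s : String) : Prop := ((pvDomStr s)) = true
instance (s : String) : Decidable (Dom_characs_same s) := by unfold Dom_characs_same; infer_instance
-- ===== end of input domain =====

-- B re-implements the adjacent-pair scan via a run-length encoding (sameChars = len - #runs,
-- rep = last run of length ≥ 2 doubled); objective: alternative decomposition, same cost.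

-- ===== PORT A =====
def characs_same (s : String) : Bool :=
  let cs := s.toList
  let n : Int := (cs.length : Int)
  let init : Int × String := (0, "")
  let res : Int × String :=
    if 3 ≤ (cs.length : Int) then
      (PySem.List.pyRange 0 (n - 1) 1).foldl (fun acc i =>
        let j := i + 1
        let si := PySem.List.pyGetD cs i ' '   -- s[i]; i is always in range in this loop
        let sj := PySem.List.pyGetD cs j ' '   -- s[j]
        if si == sj then (acc.1 + 1, String.mk [si, sj]) else acc) init
    else init
  if res.1 ≥ 2 ∨ (res.1 = 1 ∧ n = 3) ∨ (res.1 = 1 ∧ res.2 ∉ (["ss","tt","ff","ll","mm","oo","ee"] : List String)) then true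
  else false

-- ===== PORT B =====
-- Python B mutates runs[-1] in place / appends; the port keeps the run list reversed (head = current run).
def characs_same_alt (s : String) : Bool :=
  let cs := s.toList
  if cs.length < 3 then false
  else
    let runsRev : List (Char × Int) := cs.foldl (fun rs ch =>
      match rs with
      | (c, k) :: t => if c == ch then (c, k + 1) :: t else (ch, (1 : Int)) :: (c, k) :: t
      | [] => [(ch, (1 : Int))]) []
    let runs := runsRev.reverse
    let sameChars : Int := (cs.length : Int) - (runs.length : Int)
    let rep : String := runs.foldl (fun acc p => if p.2 ≥ 2 then String.mk [p.1, p.1] else acc) ""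
    decide (sameChars ≥ 2 ∨ (sameChars = 1 ∧ (cs.length : Int) = 3) ∨
      (sameChars = 1 ∧ rep ∉ (["ss","tt","ff","ll","mm","oo","ee"] : List String)))

-- ===== PRECONDITION & SPEC =====
def Spec_characs_same (s : String) (out : Bool) : Prop := out = characs_same_alt s
instance (s : String) (out : Bool) : Decidable (Spec_characs_same s out) := by unfold Spec_characs_same; infer_instance

-- ===== CLAIM (what is proved, stated in full; the proofs are below) =====
def Claim_equal_characs_same : Prop := ∀ (s : String), Dom_characs_same s → Spec_characs_same s (characs_same s)

-- ===== LEMMAS AND PROOFS =====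

-- abbreviations for the two loop bodies
def pvStep (rs : List (Char × Int)) (ch : Char) : List (Char × Int) :=
  match rs with
  | (c, k) :: t => if c == ch then (c, k + 1) :: t else (ch, (1 : Int)) :: (c, k) :: t
  | [] => [(ch, (1 : Int))]

def pvRepStep (acc : String) (p : Char × Char) : String :=
  if p.1 == p.2 then String.mk [p.1, p.2] else acc

-- number of runs of a list
def pvRuns : List Char → Nat
  | [] => 0
  | [_] => 1
  | a :: b :: t => (if a == b then 0 else 1) + pvRuns (b :: t)

-- "last adjacent equal pair, doubled" by direct recursion
def pvRepA : List Char → String → String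
  | a :: b :: t, r => pvRepA (b :: t) (if a == b then String.mk [a, a] else r)
  | _, r => r

-- the zip of a list with its tail, one cons step
theorem pvZip_cons (a b : Char) (t : List Char) :
    (a :: b :: t).zip (b :: t) = (a, b) :: (b :: t).zip t := by
  simp [List.zip]

-- the index list of A's loop produces exactly the adjacent pairs
theorem pvMapRange (cs : List Char) (d : Char) :
    (List.range (cs.length - 1)).map
        (fun k => (cs.getD k d, cs.getD (k + 1) d)) = cs.zip cs.tail := by
  induction cs with
  | nil => simp
  | cons a t ih =>
    cases t with
    | nil => simp
    | cons b u =>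
      simp only [List.tail_cons]
      rw [pvZip_cons]
      have : (a :: b :: u).length - 1 = ((b :: u).length - 1) + 1 := by
        simp [List.length]
      rw [this, List.range_succ_eq_map, List.map_cons, List.map_map]
      simp only [List.getD_cons_zero, List.getD_cons_succ, Function.comp]
      exact congrArg _ (ih)

-- A's product fold splits into a count and a last-write fold
theorem pvFoldSplit (l : List (Char × Char)) (init : Int × String) :
    l.foldl (fun acc p => if p.1 == p.2 then (acc.1 + 1, String.mk [p.1, p.2]) else acc) init
      = (init.1 + (l.countP (fun p => p.1 == p.2) : Int), l.foldl pvRepStep init.2) := by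
  induction l generalizing init with
  | nil => simp
  | cons x t ih =>
    simp only [List.foldl_cons, List.countP_cons, pvRepStep]
    by_cases h : x.1 == x.2
    · rw [ih]
      simp [h]
      push_cast
      ring
    · rw [ih]
      simp [h]

-- the last-write fold over adjacent pairs is pvRepA
theorem pvFoldRep (cs : List Char) (r : String) :
    (cs.zip cs.tail).foldl pvRepStep r = pvRepA cs r := by
  induction cs generalizing r with
  | nil => simp [pvRepA]
  | cons a t ih =>
    cases t with
    | nil => simp [pvRepA]
    | cons b u =>
      simp only [List.tail_cons] at ih ⊢
      rw [pvZip_cons, List.foldl_cons, pvRepA]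
      rw [ih]
      congr 1
      by_cases h : a == b
      · have hb : a = b := by exact beq_iff_eq.mp h
        simp [pvRepStep, h, hb]
      · simp [pvRepStep, h]

-- runs + adjacent equal pairs = length
theorem pvRuns_add_count (cs : List Char) :
    pvRuns cs + (cs.zip cs.tail).countP (fun p => p.1 == p.2) = cs.length := by
  induction cs with
  | nil => simp [pvRuns]
  | cons a t ih =>
    cases t with
    | nil => simp [pvRuns]
    | cons b u =>
      simp only [List.tail_cons] at ih ⊢
      rw [pvZip_cons, List.countP_cons, pvRuns]
      have := ih
      by_cases h : a == b <;> simp [h] at this ⊢ <;> omega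

-- length invariant of B's run-building fold
theorem pvFoldStep_length (cs : List Char) (c : Char) (k : Int) (rs : List (Char × Int)) :
    (cs.foldl pvStep ((c, k) :: rs)).length = rs.length + pvRuns (c :: cs) := by
  induction cs generalizing c k rs with
  | nil => simp [pvRuns]
  | cons x t ih =>
    simp only [List.foldl_cons, pvStep]
    by_cases h : c == x
    · have hc : c = x := beq_iff_eq.mp h
      simp only [h, if_true, if_pos trivial]
      rw [ih]
      subst hc
      simp [pvRuns]
    · simp only [h]
      rw [if_neg (by simp_all)]
      rw [ih x 1 ((c, k) :: rs)]
      simp only [List.length_cons, pvRuns, h, Bool.false_eq_true, if_false]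
      omega

-- find the first run of length ≥ 2
def pvRepFind (l : List (Char × Int)) : String :=
  match l.find? (fun p => p.2 ≥ 2) with
  | some p => String.mk [p.1, p.1]
  | none => ""

-- a "last write wins" fold equals find? on the reverse
theorem pvFoldl_lastWrite (l : List (Char × Int)) (r : String) :
    l.foldl (fun acc p => if p.2 ≥ 2 then String.mk [p.1, p.1] else acc) r
      = match l.reverse.find? (fun p => p.2 ≥ 2) with
        | some p => String.mk [p.1, p.1]
        | none => r := by
  induction l generalizing r with
  | nil => simp
  | cons x t ih =>
    rw [List.foldl_cons, ih]
    rw [List.reverse_cons, List.find?_append]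
    cases h : t.reverse.find? (fun p => p.2 ≥ 2) with
    | some p => simp [h]
    | none =>
      simp only [h, Option.none_or]
      by_cases hx : x.2 ≥ 2 <;> simp [List.find?, hx]

-- rep invariant of B's run-building fold
theorem pvFoldStep_rep (cs : List Char) (c : Char) (k : Int) (rs : List (Char × Int)) (hk : 1 ≤ k) :
    pvRepFind (cs.foldl pvStep ((c, k) :: rs)) = pvRepA (c :: cs) (pvRepFind ((c, k) :: rs)) := by
  induction cs generalizing c k rs with
  | nil => simp [pvRepA]
  | cons x t ih =>
    simp only [List.foldl_cons, pvStep]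
    by_cases h : c == x
    · have hc : c = x := beq_iff_eq.mp h
      simp only [h, if_true, if_pos trivial]
      rw [ih c (k + 1) rs (by omega)]
      subst hc
      have h2 : pvRepFind ((c, k + 1) :: rs) = String.mk [c, c] := by
        unfold pvRepFind
        rw [List.find?_cons_of_pos (by simp; omega)]
      rw [h2]
      simp [pvRepA]
    · simp only [h]
      rw [if_neg (by simp_all)]
      rw [ih x 1 ((c, k) :: rs) (by omega)]
      have h1 : pvRepFind ((x, (1:Int)) :: (c, k) :: rs) = pvRepFind ((c, k) :: rs) := by
        unfold pvRepFind
        rw [List.find?_cons_of_neg (by simp)]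
      rw [h1]
      simp [pvRepA, h]

-- B's run list on a nonempty list: length and rep characterisation
theorem pvRuns_of_foldl (a : Char) (t : List Char) :
    ((a :: t).foldl pvStep []).length = pvRuns (a :: t) ∧
    pvRepFind ((a :: t).foldl pvStep []) = pvRepA (a :: t) "" := by
  have h0 : (a :: t).foldl pvStep [] = t.foldl pvStep [(a, 1)] := by
    simp [List.foldl_cons, pvStep]
  constructor
  · rw [h0, pvFoldStep_length]
    simp
  · rw [h0, pvFoldStep_rep t a 1 [] (by omega)]
    congr 1

-- A's range fold computes the adjacent-pair count and last repeated pair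
theorem pvAfold (cs : List Char) :
    (PySem.List.pyRange 0 ((cs.length : Int) - 1) 1).foldl (fun (acc : Int × String) i =>
        let j := i + 1
        let si := PySem.List.pyGetD cs i ' '
        let sj := PySem.List.pyGetD cs j ' '
        if si == sj then (acc.1 + 1, String.mk [si, sj]) else acc) ((0 : Int), "")
      = ((((cs.zip cs.tail).countP (fun p => p.1 == p.2)) : Int), pvRepA cs "") := by
  have hbody : (fun (acc : Int × String) (i : Int) =>
      let j := i + 1
      let si := PySem.List.pyGetD cs i ' '
      let sj := PySem.List.pyGetD cs j ' '
      if si == sj then (acc.1 + 1, String.mk [si, sj]) else acc)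
      = (fun (acc : Int × String) (i : Int) =>
          (fun (acc : Int × String) (p : Char × Char) =>
            if p.1 == p.2 then (acc.1 + 1, String.mk [p.1, p.2]) else acc) acc
          ((fun (i : Int) => (PySem.List.pyGetD cs i ' ', PySem.List.pyGetD cs (i + 1) ' ')) i)) := rfl
  rw [hbody, ← List.foldl_map
    (f := fun (i : Int) => (PySem.List.pyGetD cs i ' ', PySem.List.pyGetD cs (i + 1) ' '))
    (g := fun (acc : Int × String) (p : Char × Char) =>
      if p.1 == p.2 then (acc.1 + 1, String.mk [p.1, p.2]) else acc)]
  have hmap2 : (PySem.List.pyRange 0 ((cs.length : Int) - 1) 1).map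
        (fun i => (PySem.List.pyGetD cs i ' ', PySem.List.pyGetD cs (i + 1) ' '))
      = cs.zip cs.tail := by
    rw [PySem.List.pyRange_one, List.map_map]
    have hnn : (((cs.length : Int) - 1) - 0).toNat = cs.length - 1 := by omega
    rw [hnn, ← pvMapRange cs ' ']
    apply List.map_congr_left
    intro k _
    simp only [Function.comp]
    have h1 : PySem.List.pyGetD cs ((0 : Int) + k) ' ' = cs.getD k ' ' := by
      rw [show (0 : Int) + k = (k : Int) by omega, PySem.List.pyGetD_natCast]
    have h2 : PySem.List.pyGetD cs (((0 : Int) + k) + 1) ' ' = cs.getD (k + 1) ' ' := by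
      rw [show ((0 : Int) + k) + 1 = ((k + 1 : Nat) : Int) by push_cast; ring,
        PySem.List.pyGetD_natCast]
    rw [h1, h2]
  rw [hmap2, pvFoldSplit, pvFoldRep]
  simp

-- ===== VERDICT (by name: the statement is the Claim_ definition above) =====
theorem characs_same_spec : Claim_equal_characs_same := by
  intro s _
  unfold Spec_characs_same characs_same characs_same_alt
  generalize s.toList = cs
  by_cases hlen : cs.length < 3
  · have h3 : ¬ (3 ≤ (cs.length : Int)) := by exact_mod_cast by omega
    simp only [if_neg h3, if_pos hlen]
    rw [if_neg]
    rintro (h | ⟨h, _⟩ | ⟨h, _⟩) <;> omega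
  · have h3 : 3 ≤ (cs.length : Int) := by exact_mod_cast by omega
    simp only [if_pos h3, if_neg hlen]
    rw [pvAfold]
    cases cs with
    | nil => simp at hlen
    | cons a t =>
      obtain ⟨hLen, hRep⟩ := pvRuns_of_foldl a t
      have hstepEq : (fun (rs : List (Char × Int)) (ch : Char) =>
          match rs with
          | (c, k) :: t => if c == ch then (c, k + 1) :: t else (ch, (1 : Int)) :: (c, k) :: t
          | [] => [(ch, (1 : Int))]) = pvStep := rfl
      rw [hstepEq, List.length_reverse, hLen]
      have hrepFold : (((a :: t).foldl pvStep []).reverse).foldl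
          (fun acc p => if p.2 ≥ 2 then String.mk [p.1, p.1] else acc) ""
            = pvRepA (a :: t) "" := by
        rw [pvFoldl_lastWrite, List.reverse_reverse, ← hRep]
        unfold pvRepFind
        cases h : ((a :: t).foldl pvStep []).find? (fun p => p.2 ≥ 2) <;> simp [h]
      rw [hrepFold]
      have hcount := pvRuns_add_count (a :: t)
      have hsame : ((a :: t).length : Int) - (pvRuns (a :: t) : Int)
          = ((((a :: t).zip (a :: t).tail).countP (fun p => p.1 == p.2)) : Int) := by
        omega
      rw [hsame]
      by_cases hcond : (((((a :: t).zip (a :: t).tail).countP (fun p => p.1 == p.2)) : Int) ≥ 2 ∨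
          (((((a :: t).zip (a :: t).tail).countP (fun p => p.1 == p.2)) : Int) = 1 ∧ ((a :: t).length : Int) = 3) ∨
          (((((a :: t).zip (a :: t).tail).countP (fun p => p.1 == p.2)) : Int) = 1 ∧
            pvRepA (a :: t) "" ∉ (["ss","tt","ff","ll","mm","oo","ee"] : List String)))
      · rw [if_pos hcond]
        exact (decide_eq_true hcond).symm
      · rw [if_neg hcond]
        exact (decide_eq_false hcond).symm
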